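-- pv_equiv track=rewrite | github.com/cmacboyd/advent-of-code | 2022/17/part1.py | get_starting_position
-- ===== SOURCE A (Python) =====
-- def get_starting_position(hy, block):
-- 	# hy = max(populated, key=lambda x: x[1])[1]
--
-- 	if block == '-':
-- 		return [[i, hy+4] for i in range(3,7)]
-- 	elif block == '+':
-- 		return [[4, hy+6],
-- 		[3, hy+5], [4, hy+5], [5, hy+5],
-- 				[4, hy+4]]
-- 	elif block == 'L':
-- 		return [
-- 								  [5, hy+6],
-- 								  [5, hy+5],
-- 			[3, hy+4], [4, hy+4], [5, hy+4]
-- 		]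
-- 	elif block == 'I':
-- 		return [
-- 			[3, hy+7],
-- 			[3, hy+6],
-- 			[3, hy+5],
-- 			[3, hy+4]
-- 		]
-- 	elif block == '8':
-- 		return [
-- 			[3, hy+5], [4, hy+5],
-- 			[3, hy+4], [4, hy+4]
-- 		]
-- ===== SOURCE B (Python) =====
-- # B decodes ASCII-art sprites (rows of '#'/'.') into coordinates by scanning
-- # rows top-to-bottom, instead of returning per-shape coordinate literals.
-- SPRITES = {
--     '-': ["####"],
--     '+': [".#.", "###", ".#."],
--     'L': ["..#", "..#", "###"],
--     'I': ["#", "#", "#", "#"],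
--     '8': ["##", "##"],
-- }
--
-- def get_starting_position(hy, block):
--     art = SPRITES.get(block)
--     if art is None:
--         return None
--     n = len(art)
--     return [[3 + c, hy + 4 + (n - 1 - r)]
--             for r, row in enumerate(art)
--             for c, ch in enumerate(row) if ch == '#']
-- ===== Notes on version B (the rewrite author's own statement) =====
-- stated objective: alternative
-- what changed: B stores each shape as an ASCII-art sprite (rows of '#'/'.') and decodes it with a double enumerate scan that computes each coordinate from the row/column position, instead of A's five-branch chain of hardcoded absolute-coordinate literals.
-- outside the precondition, e.g. on get_starting_position(0, 'x'): A returns None, B returns None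
import Mathlib
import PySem

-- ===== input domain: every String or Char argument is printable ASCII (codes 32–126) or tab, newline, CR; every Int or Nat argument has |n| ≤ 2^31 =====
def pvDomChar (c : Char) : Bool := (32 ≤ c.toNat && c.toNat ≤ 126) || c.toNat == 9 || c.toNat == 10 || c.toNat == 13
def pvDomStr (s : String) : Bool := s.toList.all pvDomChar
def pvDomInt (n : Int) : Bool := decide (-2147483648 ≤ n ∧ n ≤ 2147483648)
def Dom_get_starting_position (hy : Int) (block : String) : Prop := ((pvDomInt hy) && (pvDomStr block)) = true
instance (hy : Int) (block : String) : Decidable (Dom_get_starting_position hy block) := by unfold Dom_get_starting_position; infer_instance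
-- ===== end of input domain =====

-- B decodes ASCII-art sprites into coordinates by a row/column scan instead of
-- A's five branches of hardcoded coordinate literals (objective: alternative).

-- ===== PORT A =====
def get_starting_position (hy : Int) (block : String) : List (List Int) :=
  if block = "-" then
    (PySem.List.pyRange 3 7 1).map (fun i => [i, hy + 4])
  else if block = "+" then
    [[4, hy+6], [3, hy+5], [4, hy+5], [5, hy+5], [4, hy+4]]
  else if block = "L" then
    [[5, hy+6], [5, hy+5], [3, hy+4], [4, hy+4], [5, hy+4]]
  else if block = "I" then
    [[3, hy+7], [3, hy+6], [3, hy+5], [3, hy+4]]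
  else if block = "8" then
    [[3, hy+5], [4, hy+5], [3, hy+4], [4, hy+4]]
  else
    []  -- Python A falls through and returns None here; excluded by Pre_

-- ===== PORT B =====
def pvSprites : PySem.Dict String (List String) :=
  PySem.Dict.mk [("-", ["####"]),
   ("+", [".#.", "###", ".#."]),
   ("L", ["..#", "..#", "###"]),
   ("I", ["#", "#", "#", "#"]),
   ("8", ["##", "##"])]

def get_starting_position_alt (hy : Int) (block : String) : List (List Int) :=
  match PySem.Dict.get? pvSprites block with
  | none => []  -- Python B returns None here; excluded by Pre_
  | some art =>
    let n : Int := art.length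
    (PySem.List.enumerate art).flatMap (fun rrow =>
      (PySem.List.enumerate rrow.2.toList).filterMap (fun cch =>
        if cch.2 = '#' then some [3 + cch.1, hy + 4 + (n - 1 - rrow.1)] else none))

-- ===== PRECONDITION & SPEC =====
-- Pre_ excludes unrecognised block strings, on which Python A (and B) return None,
-- which is not a value of the declared list type.
def Pre_get_starting_position (hy : Int) (block : String) : Prop :=
  block = "-" ∨ block = "+" ∨ block = "L" ∨ block = "I" ∨ block = "8"
instance (hy : Int) (block : String) : Decidable (Pre_get_starting_position hy block) := by unfold Pre_get_starting_position; infer_instance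
def pvWitness_get_starting_position : Int × String := (0, "+")

def Spec_get_starting_position (hy : Int) (block : String) (out : List (List Int)) : Prop := out = get_starting_position_alt hy block
instance (hy : Int) (block : String) (out : List (List Int)) : Decidable (Spec_get_starting_position hy block out) := by unfold Spec_get_starting_position; infer_instance

-- ===== CLAIM =====
def Claim_equal_get_starting_position : Prop := ∀ (hy : Int) (block : String), Dom_get_starting_position hy block → Pre_get_starting_position hy block → Spec_get_starting_position hy block (get_starting_position hy block)

-- ===== LEMMAS AND PROOFS =====

-- ===== VERDICT =====
theorem get_starting_position_spec : Claim_equal_get_starting_position := by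
  intro hy block _ hpre
  unfold Spec_get_starting_position get_starting_position get_starting_position_alt
  rcases hpre with h | h | h | h | h <;> subst h <;>
    simp [pvSprites, PySem.Dict.get?, PySem.List.enumerate, PySem.List.pyRange,
      List.range_succ] <;> omega
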